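-- pv_equiv track=rewrite | github.com/LF-H0/ME | wbu.py | find_duplicate_urls
-- ===== SOURCE A (Python) =====
-- def find_duplicate_urls(data):
--     seen = set()
--     duplicates = []
--     for row in data:
--         if row[1] in seen:
--             duplicates.append(row)
--         else:
--             seen.add(row[1])
--     return duplicates
-- ===== SOURCE B (Python) =====
-- def find_duplicate_urls(data):
--     first = {}
--     for i, row in enumerate(data):
--         if row[1] not in first:
--             first[row[1]] = i
--     return [row for i, row in enumerate(data) if first[row[1]] != i]
-- ===== Notes on version B (the rewrite author's own statement) =====
-- stated objective: alternative
-- what changed: B replaces A's single emit-on-membership pass with a two-pass index scheme: a first pass records each url's first-occurrence index in a dict, a second enumerate pass collects every row whose index differs from its url's first index.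
import Mathlib
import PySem

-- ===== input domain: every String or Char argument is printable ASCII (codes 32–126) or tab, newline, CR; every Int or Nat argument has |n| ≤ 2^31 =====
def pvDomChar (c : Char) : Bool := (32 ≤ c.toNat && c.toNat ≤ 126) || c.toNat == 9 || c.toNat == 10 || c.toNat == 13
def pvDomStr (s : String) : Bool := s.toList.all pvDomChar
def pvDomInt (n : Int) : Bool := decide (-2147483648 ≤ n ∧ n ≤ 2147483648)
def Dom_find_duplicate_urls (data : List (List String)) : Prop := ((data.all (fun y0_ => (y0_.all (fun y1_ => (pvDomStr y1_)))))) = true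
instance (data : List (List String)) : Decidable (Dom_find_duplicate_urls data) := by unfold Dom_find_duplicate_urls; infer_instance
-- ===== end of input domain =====

-- B replaces A's emit-on-membership set pass by two passes: a dict of first-occurrence
-- indices, then an enumerate filter keeping rows whose index differs from the first index.


-- row[1]; exact under Pre_ (every row has at least 2 entries, so pyGet? is some)
def pvUrl (r : List String) : String := (PySem.List.pyGet? r 1).getD ""

-- ===== PORT A =====
def find_duplicate_urls (data : List (List String)) : List (List String) :=
  (data.foldl
    (fun (st : PySem.Set String × List (List String)) row =>
      if PySem.Set.contains st.1 (pvUrl row) then (st.1, st.2 ++ [row])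
      else (PySem.Set.add st.1 (pvUrl row), st.2))
    (PySem.Set.empty, [])).2

-- ===== PORT B =====
-- first pass of Source B: dict url -> index of its first occurrence
def pvFirstDict (data : List (List String)) : PySem.Dict String Int :=
  (PySem.List.enumerate data).foldl
    (fun d p => if d.contains (pvUrl p.2) then d else d.insert (pvUrl p.2) p.1)
    PySem.Dict.empty

def find_duplicate_urls_alt (data : List (List String)) : List (List String) :=
  ((PySem.List.enumerate data).filter
    (fun p => (pvFirstDict data).getD (pvUrl p.2) 0 != p.1)).map (·.2)

-- ===== PRECONDITION & SPEC =====
-- Pre_ excludes exactly the inputs where Python's row[1] raises IndexError (a row shorter than 2)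
def Pre_find_duplicate_urls (data : List (List String)) : Prop :=
  ∀ row ∈ data, 2 ≤ row.length
instance (data : List (List String)) : Decidable (Pre_find_duplicate_urls data) := by
  unfold Pre_find_duplicate_urls; infer_instance
def pvWitness_find_duplicate_urls : List (List String) :=
  [["a", "u"], ["b", "u"], ["c", "v"]]

def Spec_find_duplicate_urls (data : List (List String)) (out : List (List String)) : Prop := out = find_duplicate_urls_alt data
instance (data : List (List String)) (out : List (List String)) : Decidable (Spec_find_duplicate_urls data out) := by unfold Spec_find_duplicate_urls; infer_instance

-- ===== CLAIM (what is proved, stated in full; the proofs are below) =====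
def Claim_equal_find_duplicate_urls : Prop := ∀ (data : List (List String)), Dom_find_duplicate_urls data → Pre_find_duplicate_urls data → Spec_find_duplicate_urls data (find_duplicate_urls data)

-- ===== LEMMAS AND PROOFS =====

-- common specification: emit rows whose url was already seen
def pvDup (s : PySem.Set String) : List (List String) → List (List String)
  | [] => []
  | r :: rs =>
      if PySem.Set.contains s (pvUrl r) then r :: pvDup s rs
      else pvDup (PySem.Set.add s (pvUrl r)) rs

lemma pvFoldA (rs : List (List String)) : ∀ (s : PySem.Set String) (acc : List (List String)),
    (rs.foldl
      (fun (st : PySem.Set String × List (List String)) row =>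
        if PySem.Set.contains st.1 (pvUrl row) then (st.1, st.2 ++ [row])
        else (PySem.Set.add st.1 (pvUrl row), st.2))
      (s, acc)).2 = acc ++ pvDup s rs := by
  induction rs with
  | nil => simp [pvDup]
  | cons r rs ih =>
    intro s acc
    rw [List.foldl_cons]
    simp only [pvDup]
    by_cases h : PySem.Set.contains s (pvUrl r) = true
    · rw [if_pos h, if_pos h, ih]; simp
    · rw [if_neg h, if_neg h, ih]

-- index (as Int) of the first occurrence of u
def pvFirstIdx (u : String) : List String → Option Int
  | [] => none
  | v :: vs => if v = u then some 0 else (pvFirstIdx u vs).map (· + 1)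

lemma pvFirstIdx_append_of_mem (u : String) (xs ys : List String) (h : u ∈ xs) :
    pvFirstIdx u (xs ++ ys) = pvFirstIdx u xs := by
  induction xs with
  | nil => simp at h
  | cons v vs ih =>
    by_cases hv : v = u
    · simp [pvFirstIdx, hv]
    · simp only [List.mem_cons] at h
      rcases h with h | h
      · exact absurd h.symm hv
      · simp [pvFirstIdx, hv, ih h]

lemma pvFirstIdx_append_self (u : String) (xs ys : List String) (h : u ∉ xs) :
    pvFirstIdx u (xs ++ u :: ys) = some (xs.length : Int) := by
  induction xs with
  | nil => simp [pvFirstIdx]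
  | cons v vs ih =>
    simp only [List.mem_cons, not_or] at h
    have : v ≠ u := fun hh => h.1 hh.symm
    simp only [List.cons_append, pvFirstIdx, if_neg this, ih h.2]
    simp only [Option.map_some, List.length_cons]
    norm_cast

lemma pvFirstIdx_lt_of_mem (u : String) (xs : List String) (h : u ∈ xs) :
    ∃ n : Int, pvFirstIdx u xs = some n ∧ 0 ≤ n ∧ n < (xs.length : Int) := by
  induction xs with
  | nil => simp at h
  | cons v vs ih =>
    by_cases hv : v = u
    · exact ⟨0, by simp [pvFirstIdx, hv], le_refl 0, by simp⟩
    · simp only [List.mem_cons] at h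
      rcases h with h | h
      · exact absurd h.symm hv
      · obtain ⟨n, hn, h0, hlt⟩ := ih h
        refine ⟨n + 1, by simp [pvFirstIdx, hv, hn], by omega, by simp; omega⟩

lemma pvFirstFold_get? (rs : List (List String)) :
    ∀ (k : Int) (d : PySem.Dict String Int) (u : String),
    ((PySem.List.enumerate rs k).foldl
        (fun d p => if d.contains (pvUrl p.2) then d else d.insert (pvUrl p.2) p.1) d).get? u
    = match d.get? u with
      | some v => some v
      | none => (pvFirstIdx u (rs.map pvUrl)).map (fun n => k + n) := by
  induction rs with
  | nil =>
    intro k d u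
    cases h : d.get? u <;> simp [PySem.List.enumerate, pvFirstIdx, h]
  | cons r rs ih =>
    intro k d u
    have hen : PySem.List.enumerate (r :: rs) k = (k, r) :: PySem.List.enumerate rs (k + 1) := by
      simp [PySem.List.enumerate]
    rw [hen]
    simp only [List.foldl_cons]
    by_cases hc : d.contains (pvUrl r) = true
    · rw [if_pos hc, ih (k + 1) d u]
      cases hg : d.get? u with
      | some v => simp
      | none =>
        have hne : pvUrl r ≠ u := by
          intro hh
          rw [PySem.Dict.contains_eq_isSome_get?] at hc
          rw [hh, hg] at hc; simp at hc
        simp only [List.map_cons, pvFirstIdx, if_neg hne]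
        cases hfi : pvFirstIdx u (rs.map pvUrl) <;> (simp; try ring)
    · rw [if_neg hc, ih (k + 1) (d.insert (pvUrl r) k) u]
      have hg : d.get? u = none ∨ u ≠ pvUrl r := by
        by_cases hu : u = pvUrl r
        · left
          rw [PySem.Dict.contains_eq_isSome_get?] at hc
          rw [← hu] at hc
          cases h : d.get? u <;> simp [h] at hc ⊢
        · right; exact hu
      by_cases hu : u = pvUrl r
      · rcases hg with hg | hg
        · subst hu
          rw [PySem.Dict.get?_insert_self, hg]
          simp [List.map_cons, pvFirstIdx]
        · exact absurd hu hg
      · rw [PySem.Dict.get?_insert_of_ne _ _ hu]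
        cases hgg : d.get? u with
        | some v => simp
        | none =>
          simp only [List.map_cons, pvFirstIdx, if_neg (Ne.symm hu)]
          cases hfi : pvFirstIdx u (rs.map pvUrl) <;> (simp; try ring)

lemma pvFirstDict_get? (data : List (List String)) (u : String) :
    (pvFirstDict data).get? u = pvFirstIdx u (data.map pvUrl) := by
  rw [pvFirstDict, pvFirstFold_get? data 0 PySem.Dict.empty u]
  simp [PySem.Dict.get?_empty]

lemma pvFoldB (data : List (List String)) :
    ∀ (rs pre : List (List String)), pre ++ rs = data →
    ((PySem.List.enumerate rs (pre.length : Int)).filter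
        (fun p => (pvFirstDict data).getD (pvUrl p.2) 0 != p.1)).map (·.2)
    = pvDup (PySem.Set.ofList (pre.map pvUrl)) rs := by
  intro rs
  induction rs with
  | nil => intro pre _; simp [PySem.List.enumerate, pvDup]
  | cons r rs ih =>
    intro pre hpre
    have hen : PySem.List.enumerate (r :: rs) (pre.length : Int)
        = ((pre.length : Int), r) :: PySem.List.enumerate rs ((pre.length : Int) + 1) := by
      simp [PySem.List.enumerate]
    have hmapdata : data.map pvUrl = pre.map pvUrl ++ pvUrl r :: rs.map pvUrl := by
      rw [← hpre]; simp
    have hgd : (pvFirstDict data).getD (pvUrl r) 0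
        = (pvFirstIdx (pvUrl r) (data.map pvUrl)).getD 0 := by
      rw [PySem.Dict.getD_eq_get?_getD, pvFirstDict_get?]
    have hnext : ((pre.length : Int) + 1) = (((pre ++ [r]).length : Int)) := by
      simp
    have htail : (pre ++ [r]) ++ rs = data := by rw [← hpre]; simp
    have hmem_iff : PySem.Set.contains (PySem.Set.ofList (pre.map pvUrl)) (pvUrl r) = true
        ↔ pvUrl r ∈ pre.map pvUrl := by
      rw [PySem.Set.contains_iff, PySem.Set.mem_ofList]
    rw [hen]
    by_cases hm : pvUrl r ∈ pre.map pvUrl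
    · -- duplicate: first index is strictly below pre.length
      obtain ⟨n, hn, h0, hlt⟩ := pvFirstIdx_lt_of_mem (pvUrl r) (pre.map pvUrl) hm
      have hval : (pvFirstDict data).getD (pvUrl r) 0 = n := by
        rw [hgd, hmapdata, pvFirstIdx_append_of_mem _ _ _ hm, hn]; rfl
      have hkeep : ((pvFirstDict data).getD (pvUrl r) 0 != (pre.length : Int)) = true := by
        rw [hval]; simp only [bne_iff_ne, ne_eq]
        simp only [List.length_map] at hlt
        omega
      have hadd : PySem.Set.add (PySem.Set.ofList (pre.map pvUrl)) (pvUrl r)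
          = PySem.Set.ofList (pre.map pvUrl) :=
        PySem.Set.add_of_mem (by rw [PySem.Set.mem_ofList]; exact hm)
      have hih := ih (pre ++ [r]) htail
      simp only [List.map_append, List.map_cons, List.map_nil] at hih
      rw [PySem.Set.ofList_append_singleton, hadd] at hih
      simp only [List.filter_cons, hkeep, if_true, List.map_cons, pvDup, hmem_iff.mpr hm]
      rw [hnext, hih]
    · -- first occurrence: first index equals pre.length, row dropped
      have hval : (pvFirstDict data).getD (pvUrl r) 0 = ((pre.map pvUrl).length : Int) := by
        rw [hgd, hmapdata, pvFirstIdx_append_self _ _ _ hm]; rfl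
      have hdrop : ((pvFirstDict data).getD (pvUrl r) 0 != (pre.length : Int)) = false := by
        rw [hval]; simp
      have hih := ih (pre ++ [r]) htail
      simp only [List.map_append, List.map_cons, List.map_nil] at hih
      rw [PySem.Set.ofList_append_singleton] at hih
      have hnm : PySem.Set.contains (PySem.Set.ofList (pre.map pvUrl)) (pvUrl r) = false := by
        rw [← Bool.not_eq_true, hmem_iff]; exact hm
      simp only [List.filter_cons, hdrop, pvDup, hnm, Bool.false_eq_true, if_false]
      rw [hnext, hih]

-- ===== VERDICT (by name: the statement is the Claim_ definition above) =====
theorem find_duplicate_urls_spec : Claim_equal_find_duplicate_urls := by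
  intro data _ _
  unfold Spec_find_duplicate_urls
  rw [find_duplicate_urls, find_duplicate_urls_alt, pvFoldA]
  have := pvFoldB data data [] (by simp)
  simpa [PySem.Set.empty, PySem.Set.ofList] using this.symm
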